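-- pv_equiv track=rewrite | github.com/DiegoMcs7/LIBRO_TESIS_ | predicciones/prediccion_cemento_lstm/prediccion.py | _estimar_params
-- ===== SOURCE A (Python) =====
-- def _estimar_params(n_layers, hidden_size, bidirectional, n_features):
--     """Calcula el nº de parámetros de la red LSTM sin construir el modelo."""
--     n = 0
--     h_in = n_features
--     for i in range(n_layers):
--         lstm = 4 * hidden_size * (h_in + hidden_size + 1)
--         n += lstm * 2 if bidirectional else lstm
--         if i < n_layers - 1:  # BatchNorm en capas intermedias
--             h_out = hidden_size * 2 if bidirectional else hidden_size
--             n += 2 * h_out  # gamma + beta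
--         h_in = hidden_size * 2 if bidirectional else hidden_size
--     n += h_in + 1  # Dense final
--     return n
-- ===== SOURCE B (Python) =====
-- def _estimar_params(n_layers, hidden_size, bidirectional, n_features):
--     """Closed-form count of the LSTM network parameters (no loop)."""
--     if n_layers <= 0:
--         return n_features + 1
--     d = 2 if bidirectional else 1
--     h_out = d * hidden_size
--     first = d * (4 * hidden_size * (n_features + hidden_size + 1))
--     rest = (n_layers - 1) * (d * (4 * hidden_size * (h_out + hidden_size + 1)))
--     bn = (n_layers - 1) * (2 * h_out)
--     return first + rest + bn + h_out + 1
-- ===== Notes on version B (the rewrite author's own statement) =====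
-- stated objective: faster
-- what changed: Replaces the per-layer accumulation loop with a closed-form arithmetic formula: first-layer term + (n_layers-1) uniform later-layer terms + (n_layers-1) BatchNorm terms + final dense term.
import Mathlib
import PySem

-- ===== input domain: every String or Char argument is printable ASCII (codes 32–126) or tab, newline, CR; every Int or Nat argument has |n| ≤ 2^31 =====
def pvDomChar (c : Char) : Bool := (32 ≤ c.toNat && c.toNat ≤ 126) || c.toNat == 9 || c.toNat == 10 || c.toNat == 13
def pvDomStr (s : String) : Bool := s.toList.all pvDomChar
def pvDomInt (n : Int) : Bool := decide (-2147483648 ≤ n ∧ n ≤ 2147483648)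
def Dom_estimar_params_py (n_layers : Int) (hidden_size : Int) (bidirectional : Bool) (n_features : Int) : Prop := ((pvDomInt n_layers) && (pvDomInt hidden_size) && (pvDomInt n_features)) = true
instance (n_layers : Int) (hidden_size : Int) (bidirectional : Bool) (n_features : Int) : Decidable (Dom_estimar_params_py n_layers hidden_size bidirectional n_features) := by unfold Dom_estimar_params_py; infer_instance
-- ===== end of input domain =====

-- B replaces A's per-layer loop by a closed-form O(1) arithmetic formula.

-- ===== PORT A =====
-- loop body of A's `for i in range(n_layers)`, state = (n, h_in)
def pvStepA (n_layers : Int) (hidden_size : Int) (bidirectional : Bool) (st : Int × Int) (i : Int) : Int × Int :=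
  let lstm := 4 * hidden_size * (st.2 + hidden_size + 1)
  let n := st.1 + (if bidirectional then lstm * 2 else lstm)
  let n := if i < n_layers - 1 then n + 2 * (if bidirectional then hidden_size * 2 else hidden_size) else n
  (n, if bidirectional then hidden_size * 2 else hidden_size)

def estimar_params_py (n_layers : Int) (hidden_size : Int) (bidirectional : Bool) (n_features : Int) : Int :=
  let st := (PySem.List.pyRange 0 n_layers 1).foldl (pvStepA n_layers hidden_size bidirectional) (0, n_features)
  st.1 + (st.2 + 1)

-- ===== PORT B =====
def estimar_params_py_alt (n_layers : Int) (hidden_size : Int) (bidirectional : Bool) (n_features : Int) : Int :=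
  if n_layers ≤ 0 then n_features + 1
  else
    let d : Int := if bidirectional then 2 else 1
    let h_out := d * hidden_size
    let first := d * (4 * hidden_size * (n_features + hidden_size + 1))
    let rest := (n_layers - 1) * (d * (4 * hidden_size * (h_out + hidden_size + 1)))
    let bn := (n_layers - 1) * (2 * h_out)
    first + rest + bn + h_out + 1

-- ===== PRECONDITION & SPEC =====
def Spec_estimar_params_py (n_layers : Int) (hidden_size : Int) (bidirectional : Bool) (n_features : Int) (out : Int) : Prop := out = estimar_params_py_alt n_layers hidden_size bidirectional n_features
instance (n_layers : Int) (hidden_size : Int) (bidirectional : Bool) (n_features : Int) (out : Int) : Decidable (Spec_estimar_params_py n_layers hidden_size bidirectional n_features out) := by unfold Spec_estimar_params_py; infer_instance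

-- ===== CLAIM (what is proved, stated in full; the proofs are below) =====
def Claim_equal_estimar_params_py : Prop := ∀ (n_layers : Int) (hidden_size : Int) (bidirectional : Bool) (n_features : Int), Dom_estimar_params_py n_layers hidden_size bidirectional n_features → Spec_estimar_params_py n_layers hidden_size bidirectional n_features (estimar_params_py n_layers hidden_size bidirectional n_features)

-- ===== LEMMAS AND PROOFS =====

-- abbreviations used only in the proofs
def pvH (hs : Int) (bid : Bool) : Int := if bid then hs * 2 else hs
def pvT (hs : Int) (bid : Bool) (h : Int) : Int :=
  if bid then 4 * hs * (h + hs + 1) * 2 else 4 * hs * (h + hs + 1)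

theorem pvStepA_eq (N hs : Int) (bid : Bool) (st : Int × Int) (i : Int) :
    pvStepA N hs bid st i =
      ((if i < N - 1 then st.1 + pvT hs bid st.2 + 2 * pvH hs bid
        else st.1 + pvT hs bid st.2), pvH hs bid) := by
  simp only [pvStepA, pvT, pvH]

-- fold over a list of indices all < N-1, starting with h_in already = pvH
theorem pv_fold_tail (N hs : Int) (bid : Bool) :
    ∀ (l : List Int), (∀ i ∈ l, i < N - 1) → ∀ n0 : Int,
      l.foldl (pvStepA N hs bid) (n0, pvH hs bid) =
        (n0 + (l.length : Int) * (pvT hs bid (pvH hs bid) + 2 * pvH hs bid), pvH hs bid) := by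
  intro l
  induction l with
  | nil => intro _ n0; simp
  | cons a l ih =>
    intro hlt n0
    have ha : a < N - 1 := hlt a (by simp)
    simp only [List.foldl_cons, pvStepA_eq, if_pos ha]
    rw [ih (fun i hi => hlt i (by simp [hi]))]
    simp only [Prod.mk.injEq, List.length_cons, and_true]
    push_cast; ring

theorem estimar_params_py_eq_alt (N hs : Int) (bid : Bool) (nf : Int) :
    estimar_params_py N hs bid nf = estimar_params_py_alt N hs bid nf := by
  by_cases hN : N ≤ 0
  · simp [estimar_params_py, estimar_params_py_alt, PySem.List.pyRange_one_eq_nil (by omega : N ≤ (0:Int)), hN]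
  · rw [not_le] at hN
    have hsplit : PySem.List.pyRange 0 N 1 = PySem.List.pyRange 0 (N - 1) 1 ++ [N - 1] := by
      have := PySem.List.pyRange_one_succ_right (a := 0) (b := N - 1) (by omega)
      simpa [show N - 1 + 1 = N by ring] using this
    by_cases h1 : N = 1
    · subst h1
      have hr : PySem.List.pyRange 0 1 1 = [0] := by
        simpa using PySem.List.pyRange_one_singleton (a := (0:Int))
      simp only [estimar_params_py, estimar_params_py_alt, hr, List.foldl_cons, List.foldl_nil,
        pvStepA_eq, if_neg (by omega : ¬ (0:Int) < 1 - 1), if_neg (by omega : ¬ (1:Int) ≤ 0)]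
      cases bid <;> simp only [pvT, pvH, if_true, if_false, Bool.false_eq_true] <;> ring
    · -- N ≥ 2
      have hN2 : 2 ≤ N := by omega
      have hsplit0 : PySem.List.pyRange 0 (N - 1) 1 = 0 :: PySem.List.pyRange 1 (N - 1) 1 := by
        simpa using PySem.List.pyRange_one_cons (a := 0) (b := N - 1) (by omega)
      have hmem : ∀ i ∈ PySem.List.pyRange 1 (N - 1) 1, i < N - 1 := by
        intro i hi
        exact ((PySem.List.mem_pyRange_one).1 hi).2
      have hlen : ((PySem.List.pyRange 1 (N - 1) 1).length : Int) = N - 2 := by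
        rw [PySem.List.length_pyRange_one]
        omega
      simp only [estimar_params_py, hsplit, hsplit0, List.foldl_append, List.foldl_cons,
        List.foldl_nil]
      rw [show pvStepA N hs bid (0, nf) 0 =
            (pvT hs bid nf + 2 * pvH hs bid, pvH hs bid) by
          rw [pvStepA_eq, if_pos (by omega : (0:Int) < N - 1)]; simp]
      rw [pv_fold_tail N hs bid _ hmem]
      rw [pvStepA_eq]
      simp only [if_neg (by omega : ¬ (N - 1 < N - 1)), hlen]
      simp only [estimar_params_py_alt, if_neg (by omega : ¬ N ≤ 0), pvT, pvH]
      cases bid <;> simp only [if_true, if_false, Bool.false_eq_true] <;> ring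

-- ===== VERDICT (by name: the statement is the Claim_ definition above) =====
theorem estimar_params_py_spec : Claim_equal_estimar_params_py := by
  intro n_layers hidden_size bidirectional n_features _
  exact estimar_params_py_eq_alt n_layers hidden_size bidirectional n_features
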